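-- pv_equiv track=rewrite | github.com/hwkimv/beakjunCode | KHW/CLASS2/2798.py | blackjack_3cards
-- ===== SOURCE A (Python) =====
-- def blackjack_3cards(deck, card_max):
--     max_sum = 0
--
--     for card_1 in range(len(deck)):
--         for card_2 in range(card_1 + 1, len(deck)):
--             for card_3 in range(card_2 + 1, len(deck)):
--                 card_sum = deck[card_1] + deck[card_2] + deck[card_3]
--
--                 if card_max >= card_sum > max_sum:
--                     max_sum = card_sum
--
--     return max_sum
-- ===== SOURCE B (Python) =====
-- def blackjack_3cards(deck, card_max):
--     a = sorted(deck)
--     n = len(a)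
--     best = 0
--     for i in range(n):
--         lo, hi = i + 1, n - 1
--         while lo < hi:
--             s = a[i] + a[lo] + a[hi]
--             if s <= card_max:
--                 if s > best:
--                     best = s
--                 lo += 1
--             else:
--                 hi -= 1
--     return best
-- ===== Notes on version B (the rewrite author's own statement) =====
-- stated objective: faster
-- what changed: Replaces the triple nested index loop with sort-then-two-pointer: fix the smallest card, sweep a lo/hi pointer pair over the sorted deck for the best pair sum under the limit.
import Mathlib
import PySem

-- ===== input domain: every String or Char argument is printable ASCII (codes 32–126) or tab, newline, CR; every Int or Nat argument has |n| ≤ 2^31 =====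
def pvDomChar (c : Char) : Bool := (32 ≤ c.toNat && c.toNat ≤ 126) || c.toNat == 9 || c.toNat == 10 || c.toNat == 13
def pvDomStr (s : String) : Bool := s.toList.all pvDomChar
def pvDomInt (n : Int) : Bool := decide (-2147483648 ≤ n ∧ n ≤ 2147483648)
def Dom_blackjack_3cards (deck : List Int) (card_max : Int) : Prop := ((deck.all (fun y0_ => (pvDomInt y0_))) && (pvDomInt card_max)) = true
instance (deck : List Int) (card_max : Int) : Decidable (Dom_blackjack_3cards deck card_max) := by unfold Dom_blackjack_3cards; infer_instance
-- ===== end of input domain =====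

-- B replaces A's triple nested index loop (O(n^3)) by sorting the deck and running a
-- two-pointer sweep for the best pair completing each fixed smallest card (O(n^2)).

-- ===== PORT A =====
def blackjack_3cards (deck : List Int) (card_max : Int) : Int :=
  (List.range deck.length).foldl (fun m1 c1 =>
    (List.range' (c1 + 1) (deck.length - (c1 + 1))).foldl (fun m2 c2 =>
      (List.range' (c2 + 1) (deck.length - (c2 + 1))).foldl (fun m3 c3 =>
        if deck.getD c1 0 + deck.getD c2 0 + deck.getD c3 0 ≤ card_max ∧
            m3 < deck.getD c1 0 + deck.getD c2 0 + deck.getD c3 0 then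
          deck.getD c1 0 + deck.getD c2 0 + deck.getD c3 0
        else m3) m2) m1) 0

-- ===== PORT B =====
-- the 'while lo < hi' two-pointer sweep of Source B (indices are always in range, so getD is exact)
def twoPointer (a : List Int) (card_max ai : Int) (lo hi : Nat) (best : Int) : Int :=
  if h : lo < hi then
    if ai + a.getD lo 0 + a.getD hi 0 ≤ card_max then
      twoPointer a card_max ai (lo + 1) hi
        (if best < ai + a.getD lo 0 + a.getD hi 0 then ai + a.getD lo 0 + a.getD hi 0 else best)
    else twoPointer a card_max ai lo (hi - 1) best
  else best
termination_by hi - lo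
decreasing_by all_goals omega

def blackjack_3cards_alt (deck : List Int) (card_max : Int) : Int :=
  let a := PySem.List.sorted deck (fun x => x) false
  (List.range a.length).foldl
    (fun best i => twoPointer a card_max (a.getD i 0) (i + 1) (a.length - 1) best) 0

-- ===== PRECONDITION & SPEC =====
def Spec_blackjack_3cards (deck : List Int) (card_max : Int) (out : Int) : Prop := out = blackjack_3cards_alt deck card_max
instance (deck : List Int) (card_max : Int) (out : Int) : Decidable (Spec_blackjack_3cards deck card_max out) := by unfold Spec_blackjack_3cards; infer_instance

-- ===== CLAIM (what is proved, stated in full; the proofs are below) =====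
def Claim_equal_blackjack_3cards : Prop := ∀ (deck : List Int) (card_max : Int), Dom_blackjack_3cards deck card_max → Spec_blackjack_3cards deck card_max (blackjack_3cards deck card_max)

-- ===== LEMMAS AND PROOFS =====

-- s is the sum of some 3 cards of l (as a multiset choice, hence permutation-invariant)
def TriSum (l : List Int) (s : Int) : Prop :=
  ∃ x y z : Int, List.Subperm [x, y, z] l ∧ s = x + y + z

-- r is A's announced result: the largest 3-card sum in (0, card_max], or 0 if none
def Good (l : List Int) (limit r : Int) : Prop :=
  0 ≤ r ∧ (r = 0 ∨ (TriSum l r ∧ r ≤ limit)) ∧ ∀ s, TriSum l s → s ≤ limit → s ≤ r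

theorem good_unique {l : List Int} {limit r r' : Int}
    (h : Good l limit r) (h' : Good l limit r') : r = r' := by
  obtain ⟨h0, hmem, hub⟩ := h
  obtain ⟨h0', hmem', hub'⟩ := h'
  apply le_antisymm
  · rcases hmem with rfl | ⟨ht, hle⟩
    · exact h0'
    · exact hub' r ht hle
  · rcases hmem' with rfl | ⟨ht, hle⟩
    · exact h0
    · exact hub r' ht hle

theorem tri_of_perm {l l' : List Int} {s : Int} (hp : l.Perm l') (h : TriSum l s) :
    TriSum l' s := by
  obtain ⟨x, y, z, hsp, hs⟩ := h
  exact ⟨x, y, z, hsp.trans hp.subperm, hs⟩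

theorem good_perm {l l' : List Int} {limit r : Int} (hp : l.Perm l') (h : Good l limit r) :
    Good l' limit r := by
  obtain ⟨h0, hmem, hub⟩ := h
  refine ⟨h0, ?_, fun s hs hle => hub s (tri_of_perm hp.symm hs) hle⟩
  rcases hmem with rfl | ⟨ht, hle⟩
  · exact Or.inl rfl
  · exact Or.inr ⟨tri_of_perm hp ht, hle⟩

-- indices → sublist
theorem getD_single_sublist : ∀ (l : List Int) (i : Nat), i < l.length →
    List.Sublist [l.getD i 0] l := by
  intro l
  induction l with
  | nil => intro i h; simp at h
  | cons a t ih =>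
    intro i h
    cases i with
    | zero => simp
    | succ n =>
      simp only [List.getD_cons_succ]
      exact (ih n (by simpa using h)).cons a

theorem getD_pair_sublist : ∀ (l : List Int) (i j : Nat), i < j → j < l.length →
    List.Sublist [l.getD i 0, l.getD j 0] l := by
  intro l
  induction l with
  | nil => intro i j _ h; simp at h
  | cons a t ih =>
    intro i j hij hj
    cases i with
    | zero =>
      obtain ⟨j', rfl⟩ : ∃ j', j = j' + 1 := ⟨j - 1, by omega⟩
      simp only [List.getD_cons_zero, List.getD_cons_succ]
      exact (getD_single_sublist t j' (by simpa using hj)).cons₂ a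
    | succ n =>
      obtain ⟨j', rfl⟩ : ∃ j', j = j' + 1 := ⟨j - 1, by omega⟩
      simp only [List.getD_cons_succ]
      exact (ih n j' (by omega) (by simpa using hj)).cons a

theorem getD_triple_sublist : ∀ (l : List Int) (i j k : Nat), i < j → j < k → k < l.length →
    List.Sublist [l.getD i 0, l.getD j 0, l.getD k 0] l := by
  intro l
  induction l with
  | nil => intro i j k _ _ h; simp at h
  | cons a t ih =>
    intro i j k hij hjk hk
    cases i with
    | zero =>
      obtain ⟨j', rfl⟩ : ∃ j', j = j' + 1 := ⟨j - 1, by omega⟩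
      obtain ⟨k', rfl⟩ : ∃ k', k = k' + 1 := ⟨k - 1, by omega⟩
      simp only [List.getD_cons_zero, List.getD_cons_succ]
      exact (getD_pair_sublist t j' k' (by omega) (by simpa using hk)).cons₂ a
    | succ n =>
      obtain ⟨j', rfl⟩ : ∃ j', j = j' + 1 := ⟨j - 1, by omega⟩
      obtain ⟨k', rfl⟩ : ∃ k', k = k' + 1 := ⟨k - 1, by omega⟩
      simp only [List.getD_cons_succ]
      exact (ih n j' k' (by omega) (by omega) (by simpa using hk)).cons a

theorem tri_of_indices {l : List Int} {i j k : Nat} (hij : i < j) (hjk : j < k)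
    (hk : k < l.length) : TriSum l (l.getD i 0 + l.getD j 0 + l.getD k 0) :=
  ⟨_, _, _, (getD_triple_sublist l i j k hij hjk hk).subperm, rfl⟩

-- sublist → indices
theorem sublist1_idx : ∀ {l : List Int} {x : Int}, List.Sublist [x] l →
    ∃ i, i < l.length ∧ l.getD i 0 = x := by
  intro l
  induction l with
  | nil => intro x h; cases h
  | cons a t ih =>
    intro x h
    cases h with
    | cons _ h' =>
      obtain ⟨i, hi, hv⟩ := ih h'
      exact ⟨i + 1, by simpa using hi, by simpa using hv⟩
    | cons₂ h' => exact ⟨0, by simp, by simp⟩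

theorem sublist2_idx : ∀ {l : List Int} {x y : Int}, List.Sublist [x, y] l →
    ∃ i j, i < j ∧ j < l.length ∧ l.getD i 0 = x ∧ l.getD j 0 = y := by
  intro l
  induction l with
  | nil => intro x y h; cases h
  | cons a t ih =>
    intro x y h
    cases h with
    | cons _ h' =>
      obtain ⟨i, j, hij, hj, hx, hy⟩ := ih h'
      exact ⟨i + 1, j + 1, by omega, by simpa using hj, by simpa using hx, by simpa using hy⟩
    | cons₂ _ h' =>
      obtain ⟨j, hj, hy⟩ := sublist1_idx h'
      exact ⟨0, j + 1, by omega, by simpa using hj, by simp, by simpa using hy⟩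

theorem sublist3_idx : ∀ {l : List Int} {x y z : Int}, List.Sublist [x, y, z] l →
    ∃ i j k, i < j ∧ j < k ∧ k < l.length ∧ l.getD i 0 = x ∧ l.getD j 0 = y ∧ l.getD k 0 = z := by
  intro l
  induction l with
  | nil => intro x y z h; cases h
  | cons a t ih =>
    intro x y z h
    cases h with
    | cons _ h' =>
      obtain ⟨i, j, k, hij, hjk, hk, hx, hy, hz⟩ := ih h'
      exact ⟨i + 1, j + 1, k + 1, by omega, by omega, by simpa using hk,
        by simpa using hx, by simpa using hy, by simpa using hz⟩
    | cons₂ _ h' =>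
      obtain ⟨j, k, hjk, hk, hy, hz⟩ := sublist2_idx h'
      exact ⟨0, j + 1, k + 1, by omega, by omega, by simpa using hk,
        by simp, by simpa using hy, by simpa using hz⟩

theorem trisum_indices {l : List Int} {s : Int} (h : TriSum l s) :
    ∃ i j k, i < j ∧ j < k ∧ k < l.length ∧ s = l.getD i 0 + l.getD j 0 + l.getD k 0 := by
  obtain ⟨x, y, z, ⟨u, hperm, hsub⟩, rfl⟩ := h
  obtain ⟨p, q, r, rfl⟩ := List.length_eq_three.mp (by simpa using hperm.length_eq)
  obtain ⟨i, j, k, hij, hjk, hk, hx, hy, hz⟩ := sublist3_idx hsub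
  refine ⟨i, j, k, hij, hjk, hk, ?_⟩
  have hsum := hperm.sum_eq
  simp only [List.sum_cons, List.sum_nil] at hsum
  rw [hx, hy, hz]; omega

-- generic foldl lemmas
theorem foldl_ge_init {α : Type} (f : Int → α → Int) (L : List α)
    (hf : ∀ m x, x ∈ L → m ≤ f m x) (m : Int) : m ≤ L.foldl f m := by
  induction L generalizing m with
  | nil => simp
  | cons a t ih =>
    exact le_trans (hf m a (by simp)) (ih (fun m x hx => hf m x (by simp [hx])) _)

theorem foldl_bound {α : Type} (f : Int → α → Int) (L : List α)
    (hf : ∀ m x, x ∈ L → m ≤ f m x) {x : α} (hx : x ∈ L) (t : Int)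
    (ht : ∀ m, t ≤ f m x) (m : Int) : t ≤ L.foldl f m := by
  induction L generalizing m with
  | nil => cases hx
  | cons a tl ih =>
    rw [List.foldl_cons]
    rcases List.mem_cons.mp hx with h | h
    · subst h
      exact le_trans (ht m) (foldl_ge_init f tl (fun m x hx => hf m x (by simp [hx])) _)
    · exact ih (fun m x hx => hf m x (by simp [hx])) h _

theorem foldl_inv {α : Type} (P : Int → Prop) (f : Int → α → Int) (L : List α)
    (hf : ∀ m x, x ∈ L → P m → P (f m x)) (m : Int) (hm : P m) : P (L.foldl f m) := by
  induction L generalizing m with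
  | nil => exact hm
  | cons a t ih =>
    exact ih (fun m x hx => hf m x (by simp [hx])) _ (hf m a (by simp) hm)

-- the invariant both programs maintain on their running maximum
def LoopInv (l : List Int) (limit m : Int) : Prop :=
  0 ≤ m ∧ (m = 0 ∨ (TriSum l m ∧ m ≤ limit))

-- ===== A-side =====
theorem goodA (deck : List Int) (limit : Int) : Good deck limit (blackjack_3cards deck limit) := by
  have hinv : LoopInv deck limit (blackjack_3cards deck limit) := by
    unfold blackjack_3cards
    refine foldl_inv _ _ _ ?_ 0 ⟨le_refl 0, Or.inl rfl⟩
    intro m1 c1 hc1 hm1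
    refine foldl_inv _ _ _ ?_ m1 hm1
    intro m2 c2 hc2 hm2
    refine foldl_inv _ _ _ ?_ m2 hm2
    intro m3 c3 hc3 hm3
    have hc1' : c1 < deck.length := List.mem_range.mp hc1
    obtain ⟨i2, hi2, hc2e⟩ := List.mem_range'.mp hc2
    obtain ⟨i3, hi3, hc3e⟩ := List.mem_range'.mp hc3
    obtain ⟨hm30, hm3m⟩ := hm3
    split
    · rename_i hcond
      exact ⟨by omega, Or.inr ⟨tri_of_indices (i := c1) (by omega) (by omega) (by omega),
        hcond.1⟩⟩
    · exact ⟨hm30, hm3m⟩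
  refine ⟨hinv.1, hinv.2.imp id id, ?_⟩
  intro s hts hle
  obtain ⟨i, j, k, hij, hjk, hk, rfl⟩ := trisum_indices hts
  have hjmem : j ∈ List.range' (i + 1) (deck.length - (i + 1)) :=
    List.mem_range'.mpr ⟨j - (i + 1), by omega, by omega⟩
  have hkmem : k ∈ List.range' (j + 1) (deck.length - (j + 1)) :=
    List.mem_range'.mpr ⟨k - (j + 1), by omega, by omega⟩
  have himem : i ∈ List.range deck.length := List.mem_range.mpr (by omega)
  unfold blackjack_3cards
  refine foldl_bound _ _ ?_ himem _ ?_ 0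
  · intro m x _
    refine foldl_ge_init _ _ ?_ m
    intro m2 y _
    refine foldl_ge_init _ _ ?_ m2
    intro m3 z _
    split <;> omega
  · intro m
    refine foldl_bound _ _ ?_
      hjmem _ ?_ m
    · intro m2 y _
      refine foldl_ge_init _ _ ?_ m2
      intro m3 z _
      split <;> omega
    · intro m2
      refine foldl_bound _ _ ?_
        hkmem _ ?_ m2
      · intro m3 z _
        split <;> omega
      · intro m3
        split <;> omega

-- ===== B-side =====
theorem twoP_ge_best (a : List Int) (limit ai : Int) :
    ∀ d lo hi best, hi - lo = d → best ≤ twoPointer a limit ai lo hi best := by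
  intro d
  induction d with
  | zero =>
    intro lo hi best hd
    rw [twoPointer.eq_def, dif_neg (by omega)]
  | succ n ih =>
    intro lo hi best hd
    rw [twoPointer.eq_def, dif_pos (by omega)]
    split
    · refine le_trans ?_ (ih (lo + 1) hi _ (by omega))
      split <;> omega
    · exact ih lo (hi - 1) best (by omega)

theorem twoP_inv (a : List Int) (limit : Int) (i : Nat) :
    ∀ d lo hi best, hi - lo = d → i < lo → hi < a.length → LoopInv a limit best →
      LoopInv a limit (twoPointer a limit (a.getD i 0) lo hi best) := by
  intro d
  induction d with
  | zero =>
    intro lo hi best hd _ _ hb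
    rw [twoPointer.eq_def, dif_neg (by omega)]; exact hb
  | succ n ih =>
    intro lo hi best hd hil hhi hb
    have hlh : lo < hi := by omega
    obtain ⟨hb0, hbm⟩ := hb
    rw [twoPointer.eq_def, dif_pos hlh]
    split
    · rename_i hcond
      refine ih (lo + 1) hi _ (by omega) (by omega) hhi ?_
      split
      · exact ⟨by omega, Or.inr ⟨tri_of_indices hil hlh hhi, hcond⟩⟩
      · exact ⟨hb0, hbm⟩
    · exact ih lo (hi - 1) best (by omega) hil (by omega) ⟨hb0, hbm⟩

theorem twoP_bound (a : List Int) (limit ai : Int)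
    (hmono : ∀ p q : Nat, p ≤ q → q < a.length → a.getD p 0 ≤ a.getD q 0) :
    ∀ d lo hi best j k, hi - lo = d → hi < a.length → lo ≤ j → j < k → k ≤ hi →
      ai + a.getD j 0 + a.getD k 0 ≤ limit →
      ai + a.getD j 0 + a.getD k 0 ≤ twoPointer a limit ai lo hi best := by
  intro d
  induction d with
  | zero => intro lo hi best j k hd _ _ _ _ _; omega
  | succ n ih =>
    intro lo hi best j k hd hhi hlj hjk hkh hle
    have hlh : lo < hi := by omega
    rw [twoPointer.eq_def, dif_pos hlh]
    split
    · rename_i hs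
      by_cases hj : j = lo
      · subst hj
        have h1 : a.getD k 0 ≤ a.getD hi 0 := hmono k hi hkh hhi
        have h3 : ai + a.getD j 0 + a.getD hi 0 ≤
            (if best < ai + a.getD j 0 + a.getD hi 0 then ai + a.getD j 0 + a.getD hi 0
              else best) := by split <;> omega
        have h2 := twoP_ge_best a limit ai n (j + 1) hi
          (if best < ai + a.getD j 0 + a.getD hi 0 then ai + a.getD j 0 + a.getD hi 0 else best)
          (by omega)
        omega
      · exact ih (lo + 1) hi _ j k (by omega) hhi (by omega) hjk hkh hle
    · rename_i hs
      by_cases hk : k = hi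
      · subst hk
        have h1 : a.getD lo 0 ≤ a.getD j 0 := hmono lo j hlj (by omega)
        omega
      · exact ih lo (hi - 1) best j k (by omega) (by omega) hlj hjk (by omega) hle

theorem goodB (deck : List Int) (limit : Int) :
    Good (PySem.List.sorted deck (fun x => x) false) limit (blackjack_3cards_alt deck limit) := by
  have hmono : ∀ p q : Nat, p ≤ q →
      q < (PySem.List.sorted deck (fun x => x) false).length →
      (PySem.List.sorted deck (fun x => x) false).getD p 0 ≤
        (PySem.List.sorted deck (fun x => x) false).getD q 0 := by
    intro p q hpq hq
    rw [List.getD_eq_getElem _ _ (lt_of_le_of_lt hpq hq), List.getD_eq_getElem _ _ hq]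
    exact PySem.List.sorted_id_getElem_mono deck hpq hq
  have hinv : LoopInv (PySem.List.sorted deck (fun x => x) false) limit
      (blackjack_3cards_alt deck limit) := by
    unfold blackjack_3cards_alt
    refine foldl_inv _ _ _ ?_ 0 ⟨le_refl 0, Or.inl rfl⟩
    intro m i hi hm
    have hi' := List.mem_range.mp hi
    exact twoP_inv _ limit i _ (i + 1) ((PySem.List.sorted deck (fun x => x) false).length - 1)
      m rfl (by omega) (by omega) hm
  refine ⟨hinv.1, hinv.2.imp id id, ?_⟩
  intro s hts hle
  obtain ⟨i, j, k, hij, hjk, hk, rfl⟩ := trisum_indices hts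
  have himem : i ∈ List.range (PySem.List.sorted deck (fun x => x) false).length :=
    List.mem_range.mpr (by omega)
  unfold blackjack_3cards_alt
  refine foldl_bound _ _ ?_ himem _ ?_ 0
  · intro m x _
    exact twoP_ge_best _ limit _ _ (x + 1) _ m rfl
  · intro m
    exact twoP_bound _ limit _ hmono _ (i + 1)
      ((PySem.List.sorted deck (fun x => x) false).length - 1) m j k rfl (by omega) (by omega)
      hjk (by omega) hle

-- ===== VERDICT (by name: the statement is the Claim_ definition above) =====
theorem blackjack_3cards_spec : Claim_equal_blackjack_3cards := by
  intro deck card_max _hdom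
  show blackjack_3cards deck card_max = blackjack_3cards_alt deck card_max
  exact good_unique (goodA deck card_max)
    (good_perm (PySem.List.sorted_perm deck (fun x => x) false) (goodB deck card_max))
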